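-- pv_equiv track=rewrite | github.com/aarondewindt/cw | cw/shave.py | prev_good
-- ===== SOURCE A (Python) =====
-- def prev_good(bad_samples_idx, i):
--     """
--     Find the index of the previous good item in the list.
--
--     :param bad_samples_idx: List of the indices of the bad samples.
--     :param i: Index of the current item.
--
--     :return: Index of the previous good item.
--     """
--
--     while True:
--         i -= 1
--         if i < 1:
--             return bad_samples_idx[0] - 1
--
--         if (bad_samples_idx[i] - 1) == bad_samples_idx[i - 1]:
--             continue
--         else:
--             break
--
--     return bad_samples_idx[i] - 1
-- ===== SOURCE B (Python) =====
-- def prev_good(bad_samples_idx, i):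
--     """Forward pass: remember the last run-break position before i, then index once."""
--     if i <= 1:
--         return bad_samples_idx[0] - 1
--     start = 0
--     for k in range(1, i):
--         if bad_samples_idx[k] - 1 != bad_samples_idx[k - 1]:
--             start = k
--     return bad_samples_idx[start] - 1
-- ===== Notes on version B (the rewrite author's own statement) =====
-- stated objective: alternative
-- what changed: A walks backward from i with an early-exit while-loop comparing adjacent entries; B does a single forward pass over range(1, i) that records the last position where the consecutive run breaks, then indexes once.
import Mathlib
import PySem

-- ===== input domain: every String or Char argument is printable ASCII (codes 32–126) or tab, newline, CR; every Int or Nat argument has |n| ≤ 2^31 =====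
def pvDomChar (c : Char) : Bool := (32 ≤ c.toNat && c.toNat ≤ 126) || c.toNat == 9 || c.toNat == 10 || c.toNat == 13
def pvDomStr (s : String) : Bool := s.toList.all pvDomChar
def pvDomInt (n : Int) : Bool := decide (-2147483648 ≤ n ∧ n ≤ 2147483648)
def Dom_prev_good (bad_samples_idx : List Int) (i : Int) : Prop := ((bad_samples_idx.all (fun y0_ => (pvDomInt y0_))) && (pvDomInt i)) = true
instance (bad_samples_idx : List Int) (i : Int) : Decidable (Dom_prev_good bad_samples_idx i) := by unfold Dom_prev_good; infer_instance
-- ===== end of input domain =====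

-- B replaces A's backward early-exit walk by a single forward pass that remembers the
-- last run-break position before i (objective: alternative; equal return values).

-- ===== PORT A =====
-- literal port of A's backward while-loop; list indexing via pyGetD (indices used are
-- in range whenever Pre_ holds, where Python A returns)
def prev_good (bad_samples_idx : List Int) (i : Int) : Int :=
  if i - 1 < 1 then PySem.List.pyGetD bad_samples_idx 0 0 - 1
  else if PySem.List.pyGetD bad_samples_idx (i - 1) 0 - 1
          = PySem.List.pyGetD bad_samples_idx (i - 1 - 1) 0 then
    prev_good bad_samples_idx (i - 1)
  else PySem.List.pyGetD bad_samples_idx (i - 1) 0 - 1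
termination_by i.toNat
decreasing_by omega

-- ===== PORT B =====
def prev_good_alt (bad_samples_idx : List Int) (i : Int) : Int :=
  if i ≤ 1 then PySem.List.pyGetD bad_samples_idx 0 0 - 1
  else
    let start := (PySem.List.pyRange 1 i 1).foldl
      (fun s k => if PySem.List.pyGetD bad_samples_idx k 0 - 1
                     ≠ PySem.List.pyGetD bad_samples_idx (k - 1) 0 then k else s) 0
    PySem.List.pyGetD bad_samples_idx start 0 - 1

-- ===== PRECONDITION & SPEC =====
-- Pre_ excludes exactly the inputs where Python A raises IndexError:
-- an empty list, or i beyond the list length (the first backward step indexes out of range).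
def Pre_prev_good (bad_samples_idx : List Int) (i : Int) : Prop :=
  bad_samples_idx ≠ [] ∧ i ≤ (bad_samples_idx.length : Int)
instance (bad_samples_idx : List Int) (i : Int) : Decidable (Pre_prev_good bad_samples_idx i) := by
  unfold Pre_prev_good; infer_instance

def pvWitness_prev_good : List Int × Int := ([3, 4, 5, 9], 4)

def Spec_prev_good (bad_samples_idx : List Int) (i : Int) (out : Int) : Prop := out = prev_good_alt bad_samples_idx i
instance (bad_samples_idx : List Int) (i : Int) (out : Int) : Decidable (Spec_prev_good bad_samples_idx i out) := by unfold Spec_prev_good; infer_instance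

-- ===== CLAIM (what is proved, stated in full; the proofs are below) =====
def Claim_equal_prev_good : Prop := ∀ (bad_samples_idx : List Int) (i : Int), Dom_prev_good bad_samples_idx i → Pre_prev_good bad_samples_idx i → Spec_prev_good bad_samples_idx i (prev_good bad_samples_idx i)

-- ===== LEMMAS AND PROOFS =====

-- the accumulator of B's forward pass after scanning range(1, j)
def pvLastBreak (bad : List Int) (j : Int) : Int :=
  (PySem.List.pyRange 1 j 1).foldl
    (fun s k => if PySem.List.pyGetD bad k 0 - 1
                   ≠ PySem.List.pyGetD bad (k - 1) 0 then k else s) 0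

lemma pvLastBreak_succ (bad : List Int) (n : ℕ) :
    pvLastBreak bad ((n : Int) + 1 + 1) =
      if PySem.List.pyGetD bad ((n : Int) + 1) 0 - 1
         ≠ PySem.List.pyGetD bad ((n : Int) + 1 - 1) 0 then (n : Int) + 1
      else pvLastBreak bad ((n : Int) + 1) := by
  unfold pvLastBreak
  rw [PySem.List.pyRange_one_succ_right (by omega : (1 : Int) ≤ (n : Int) + 1)]
  rw [List.foldl_append]
  simp

-- A's loop result equals B's "index at the last break" for every positive i
lemma pv_main (bad : List Int) (n : ℕ) :
    prev_good bad ((n : Int) + 1) =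
      PySem.List.pyGetD bad (pvLastBreak bad ((n : Int) + 1)) 0 - 1 := by
  induction n with
  | zero =>
    rw [prev_good]
    simp [pvLastBreak, PySem.List.pyRange_one_eq_nil (by omega : (1 : Int) ≤ 1)]
  | succ m ih =>
    rw [prev_good]
    push_cast
    rw [pvLastBreak_succ]
    have h1 : ¬ ((m : Int) + 1 + 1 - 1 < 1) := by omega
    have h2 : ((m : Int) + 1 + 1 - 1) = (m : Int) + 1 := by omega
    rw [if_neg h1, h2]
    by_cases hb : PySem.List.pyGetD bad ((m : Int) + 1) 0 - 1
        = PySem.List.pyGetD bad ((m : Int) + 1 - 1) 0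
    · rw [if_pos hb, if_neg (not_not_intro hb), ih]
    · rw [if_neg hb, if_pos hb]

lemma pv_eq (bad : List Int) (i : Int) : prev_good bad i = prev_good_alt bad i := by
  by_cases h : i ≤ 1
  · rw [prev_good]
    simp [prev_good_alt, h, show i - 1 < 1 by omega]
  · have hn : i = ((i - 1).toNat : Int) + 1 := by omega
    rw [hn, pv_main bad (i - 1).toNat]
    simp only [prev_good_alt, show ¬ (((i - 1).toNat : Int) + 1 ≤ 1) by omega, if_false]
    rfl

-- ===== VERDICT (by name: the statement is the Claim_ definition above) =====
theorem prev_good_spec : Claim_equal_prev_good := by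
  intro bad i _ _
  unfold Spec_prev_good
  exact pv_eq bad i
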